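-- pv_equiv track=rewrite | github.com/vadim-or/mistune | mistune/toc.py | render_toc_ul
-- ===== SOURCE A (Python) =====
-- def render_toc_ul(toc):
--     """Render a <ul> table of content HTML. The param "toc" should
--     be formatted into this structure::
--
--         [
--           (level, id, text),
--         ]
--
--     For example::
--
--         [
--           (1, 'toc-intro', 'Introduction'),
--           (2, 'toc-install', 'Install'),
--           (2, 'toc-upgrade', 'Upgrade'),
--           (1, 'toc-license', 'License'),
--         ]
--     """
--     if not toc:
--         return ''
--
--     s = '<ul>\n'
--     levels = []
--     for level, k, text in toc:
--         item = '<a href="#{}">{}</a>'.format(k, text)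
--         if not levels:
--             s += '<li>' + item
--             levels.append(level)
--         elif level == levels[-1]:
--             s += '</li>\n<li>' + item
--         elif level > levels[-1]:
--             s += '\n<ul>\n<li>' + item
--             levels.append(level)
--         else:
--             last_level = levels.pop()
--             while levels:
--                 last_level = levels.pop()
--                 if level == last_level:
--                     s += '</li>\n</ul>\n</li>\n<li>' + item
--                     levels.append(level)
--                     break
--                 elif level > last_level:
--                     s += '</li>\n<li>' + item
--                     levels.append(last_level)
--                     levels.append(level)
--                     break
--                 else:
--                     s += '</li>\n</ul>\n'
--             else:
--                 levels.append(level)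
--                 s += '</li>\n<li>' + item
--
--     while len(levels) > 1:
--         s += '</li>\n</ul>\n'
--         levels.pop()
--
--     return s + '</li>\n</ul>\n'
-- ===== SOURCE B (Python) =====
-- def render_toc_ul(toc):
--     """Render a <ul> table of content HTML (tree-based re-implementation)."""
--     if not toc:
--         return ''
--     roots = []
--     stack = []  # open frames: [level, anchor, children]; top is last
--     def pop_attach():
--         level, anchor, children = stack.pop()
--         node = (anchor, children)
--         (stack[-1][2] if stack else roots).append(node)
--     for level, k, text in toc:
--         while stack and stack[-1][0] >= level:
--             pop_attach()
--         stack.append([level, '<a href="#{}">{}</a>'.format(k, text), []])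
--     while stack:
--         pop_attach()
--     def render(nodes):
--         out = '<ul>\n'
--         for anchor, children in nodes:
--             out += '<li>' + anchor
--             if children:
--                 out += '\n' + render(children)
--             out += '</li>\n'
--         return out + '</ul>\n'
--     return render(roots)
-- ===== Notes on version B (the rewrite author's own statement) =====
-- stated objective: alternative
-- what changed: B first parses the flat (level,id,text) list into a nesting tree with a parent stack (pop frames whose level is >= the current one, attach, push) and then renders the tree recursively, instead of A's single-pass emitter that interleaves HTML output with a bare level stack and an inner while/else loop.
import Mathlib
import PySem

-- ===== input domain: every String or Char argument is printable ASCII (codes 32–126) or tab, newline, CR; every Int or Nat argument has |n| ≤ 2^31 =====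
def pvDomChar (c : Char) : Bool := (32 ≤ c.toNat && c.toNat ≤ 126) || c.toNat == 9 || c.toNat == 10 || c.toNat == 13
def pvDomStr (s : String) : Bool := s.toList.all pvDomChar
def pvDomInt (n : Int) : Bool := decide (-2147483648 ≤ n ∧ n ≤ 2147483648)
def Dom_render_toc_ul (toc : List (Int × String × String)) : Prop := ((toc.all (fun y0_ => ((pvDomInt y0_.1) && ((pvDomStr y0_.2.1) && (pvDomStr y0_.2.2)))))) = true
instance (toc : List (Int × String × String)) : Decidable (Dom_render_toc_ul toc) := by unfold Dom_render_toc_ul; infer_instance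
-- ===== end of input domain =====

-- B re-renders the TOC by first building the nesting tree with a parent stack and then
-- rendering it recursively, instead of A's single-pass emitter over a level stack ("alternative").

-- ===== PORT A =====
-- A's inner `while levels: ... else: ...` loop (entered after the unconditional first pop).
def aInner (level : Int) (item : String) : String → List Int → String × List Int
  | s, [] => (s ++ "</li>\n<li>" ++ item, [level])
  | s, last :: rest =>
    if level = last then (s ++ "</li>\n</ul>\n</li>\n<li>" ++ item, level :: rest)
    else if level > last then (s ++ "</li>\n<li>" ++ item, level :: last :: rest)
    else aInner level item (s ++ "</li>\n</ul>\n") rest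

-- one iteration of A's `for level, k, text in toc` loop (Python levels[-1] = head here)
def aStep : String × List Int → Int × String × String → String × List Int
  | (s, levels), (level, k, text) =>
    let item := "<a href=\"#" ++ k ++ "\">" ++ text ++ "</a>"
    match levels with
    | [] => (s ++ "<li>" ++ item, [level])
    | top :: rest =>
      if level = top then (s ++ "</li>\n<li>" ++ item, top :: rest)
      else if level > top then (s ++ "\n<ul>\n<li>" ++ item, level :: top :: rest)
      else aInner level item s rest

-- A's closing loop `while len(levels) > 1: ...` followed by the final `s + '</li>\n</ul>\n'`
def aClose : List Int → String → String
  | _ :: rest@(_ :: _), s => aClose rest (s ++ "</li>\n</ul>\n")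
  | _, s => s ++ "</li>\n</ul>\n"

def render_toc_ul (toc : List (Int × String × String)) : String :=
  match toc with
  | [] => ""
  | _ =>
    let r := toc.foldl aStep ("<ul>\n", [])
    aClose r.2 r.1

-- ===== PORT B =====
-- explicit child-list tree (mutual pair, no nested inductive)
mutual
inductive PvTree where
  | node : String → PvForest → PvTree
deriving DecidableEq
inductive PvForest where
  | nil : PvForest
  | cons : PvTree → PvForest → PvForest
deriving DecidableEq
end

-- Python's `children.append(node)` on the end of a list
def PvForest.snoc : PvForest → PvTree → PvForest
  | .nil, t => .cons t .nil
  | .cons h r, t => .cons h (r.snoc t)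

-- Source B's `while stack and stack[-1][0] >= level: pop_attach()` (pop_attach inlined)
def bPop (level : Int) : PvForest → List (Int × String × PvForest) → PvForest × List (Int × String × PvForest)
  | roots, [] => (roots, [])
  | roots, (l, a, ch) :: rest =>
    if level ≤ l then
      match rest with
      | [] => bPop level (roots.snoc (.node a ch)) []
      | (l2, a2, ch2) :: rest2 => bPop level roots ((l2, a2, ch2.snoc (.node a ch)) :: rest2)
    else (roots, (l, a, ch) :: rest)
  termination_by _ stack => stack.length

-- Source B's main `for level, k, text in toc` loop
def bBuild : PvForest → List (Int × String × PvForest) → List (Int × String × String) → PvForest × List (Int × String × PvForest)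
  | roots, stack, [] => (roots, stack)
  | roots, stack, (level, k, text) :: rest =>
    let p := bPop level roots stack
    bBuild p.1 ((level, "<a href=\"#" ++ k ++ "\">" ++ text ++ "</a>", PvForest.nil) :: p.2) rest

-- Source B's trailing `while stack: pop_attach()`
def bCloseAll : PvForest → List (Int × String × PvForest) → PvForest
  | roots, [] => roots
  | roots, (_, a, ch) :: rest =>
    match rest with
    | [] => bCloseAll (roots.snoc (.node a ch)) []
    | (l2, a2, ch2) :: rest2 => bCloseAll roots ((l2, a2, ch2.snoc (.node a ch)) :: rest2)
  termination_by _ stack => stack.length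

-- Source B's recursive `render` (the per-item body is renderNode, the loop body renderItems)
mutual
def renderNode : PvTree → String
  | .node a c =>
    "<li>" ++ a ++ (match c with
      | .nil => ""
      | .cons t r => "\n" ++ ("<ul>\n" ++ renderItems (.cons t r) ++ "</ul>\n"))
def renderItems : PvForest → String
  | .nil => ""
  | .cons t rest => renderNode t ++ "</li>\n" ++ renderItems rest
end

def render_toc_ul_alt (toc : List (Int × String × String)) : String :=
  if toc.isEmpty then ""
  else
    let p := bBuild .nil [] toc
    "<ul>\n" ++ renderItems (bCloseAll p.1 p.2) ++ "</ul>\n"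

-- ===== PRECONDITION & SPEC =====
def Spec_render_toc_ul (toc : List (Int × String × String)) (out : String) : Prop := out = render_toc_ul_alt toc
instance (toc : List (Int × String × String)) (out : String) : Decidable (Spec_render_toc_ul toc out) := by unfold Spec_render_toc_ul; infer_instance

-- ===== CLAIM (what is proved, stated in full; the proofs are below) =====
def Claim_equal_render_toc_ul : Prop := ∀ (toc : List (Int × String × String)), Dom_render_toc_ul toc → Spec_render_toc_ul toc (render_toc_ul toc)

-- ===== LEMMAS AND PROOFS =====

-- splitting A's composite literals into the atoms B's renderer emits (all definitional)
theorem splitLiLi : ("</li>\n<li>" : String) = "</li>\n" ++ "<li>" := rfl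
theorem splitNlUlLi : ("\n<ul>\n<li>" : String) = "\n" ++ ("<ul>\n" ++ "<li>") := rfl
theorem splitCloseLiLi : ("</li>\n</ul>\n</li>\n<li>" : String) = "</li>\n" ++ ("</ul>\n" ++ ("</li>\n" ++ "<li>")) := rfl
theorem splitClose : ("</li>\n</ul>\n" : String) = "</li>\n" ++ "</ul>\n" := rfl
theorem splitNlUl : ("\n<ul>\n" : String) = "\n" ++ "<ul>\n" := rfl

-- the prefix a still-open frame (level, a, ch) has contributed to A's string
def pvPref (a : String) (ch : PvForest) : String := "<li>" ++ a ++ "\n<ul>\n" ++ renderItems ch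
def pvPrefs : List (Int × String × PvForest) → String
  | [] => ""
  | (_, a, ch) :: rest => pvPrefs rest ++ pvPref a ch
-- n copies of the closing token
def pvCrep : Nat → String
  | 0 => ""
  | n + 1 => "</li>\n</ul>\n" ++ pvCrep n

theorem snoc_renderItems : ∀ (f : PvForest) (n : PvTree),
    renderItems (f.snoc n) = renderItems f ++ (renderNode n ++ "</li>\n")
  | .nil, n => by
    simp only [PvForest.snoc, renderItems, String.empty_append, String.append_empty]
  | .cons t r, n => by
    simp only [PvForest.snoc, renderItems, snoc_renderItems r n, String.append_assoc]

theorem node_snoc (a : String) (ch : PvForest) (n : PvTree) :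
    renderNode (.node a (ch.snoc n)) = pvPref a ch ++ (renderNode n ++ ("</li>\n" ++ "</ul>\n")) := by
  cases ch <;>
    simp only [PvForest.snoc, renderNode, renderItems, pvPref, snoc_renderItems, splitNlUl,
      String.append_assoc, String.append_empty, String.empty_append]

theorem aClose_eq : ∀ (lv : List Int) (s : String),
    aClose lv s = s ++ ("</li>\n</ul>\n" ++ pvCrep (lv.length - 1))
  | [], s => by
    simp only [aClose, List.length_nil, Nat.zero_sub, pvCrep, String.append_empty]
  | [_], s => by simp only [aClose, pvCrep, List.length_cons, List.length_nil,
      Nat.add_sub_cancel, String.append_empty]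
  | x :: y :: r, s => by
    simp only [aClose, aClose_eq (y :: r) (s ++ "</li>\n</ul>\n"), List.length_cons,
      Nat.add_sub_cancel, pvCrep, String.append_assoc]

theorem final_lemma : ∀ (rest : List (Int × String × PvForest)) (roots : PvForest) (l : Int) (a : String) (ch : PvForest),
    renderItems (bCloseAll roots ((l, a, ch) :: rest)) ++ "</ul>\n" =
      renderItems roots ++ (pvPrefs rest ++ (renderNode (.node a ch) ++ ("</li>\n" ++ ("</ul>\n" ++ pvCrep rest.length))))
  | [], roots, l, a, ch => by
    simp only [bCloseAll, snoc_renderItems, pvPrefs, pvCrep, List.length_nil,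
      String.append_assoc, String.append_empty, String.empty_append]
  | (l2, a2, ch2) :: rest2, roots, l, a, ch => by
    simp only [bCloseAll, final_lemma rest2 roots l2 a2 (ch2.snoc (.node a ch)), node_snoc,
      pvPrefs, pvCrep, splitClose, List.length_cons, String.append_assoc]

-- B's attach-then-keep-popping step, factored out of bPop for the induction
def bStep (L : Int) (roots : PvForest) (rest : List (Int × String × PvForest)) (n : PvTree) :
    PvForest × List (Int × String × PvForest) :=
  match rest with
  | [] => (roots.snoc n, [])
  | (l2, a2, ch2) :: rest2 => bPop L roots ((l2, a2, ch2.snoc n) :: rest2)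

theorem bPop_eq_bStep (L : Int) (roots : PvForest) (l : Int) (a : String) (ch : PvForest)
    (rest : List (Int × String × PvForest)) (h : L ≤ l) :
    bPop L roots ((l, a, ch) :: rest) = bStep L roots rest (.node a ch) := by
  cases rest with
  | nil => simp only [bPop, if_pos h, bStep]
  | cons f r => obtain ⟨l2, a2, ch2⟩ := f; simp only [bPop, if_pos h, bStep]

theorem bPop_stop (L : Int) (roots : PvForest) (l : Int) (a : String) (ch : PvForest)
    (rest : List (Int × String × PvForest)) (h : ¬ L ≤ l) :
    bPop L roots ((l, a, ch) :: rest) = (roots, (l, a, ch) :: rest) := by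
  cases rest with
  | nil => simp only [bPop, if_neg h]
  | cons f r => obtain ⟨l2, a2, ch2⟩ := f; simp only [bPop, if_neg h]

theorem inner_lemma : ∀ (rest : List (Int × String × PvForest)) (roots : PvForest) (n : PvTree) (L : Int) (item s : String),
    List.IsChain (fun x y : Int => y < x) (rest.map (·.1)) →
    s = "<ul>\n" ++ (renderItems roots ++ (pvPrefs rest ++ renderNode n)) →
    (aInner L item s (rest.map (·.1))).1 =
        "<ul>\n" ++ (renderItems (bStep L roots rest n).1 ++ (pvPrefs (bStep L roots rest n).2 ++ ("<li>" ++ item)))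
      ∧ (aInner L item s (rest.map (·.1))).2 = L :: (bStep L roots rest n).2.map (·.1)
      ∧ List.IsChain (fun x y : Int => y < x) (L :: (bStep L roots rest n).2.map (·.1))
  | [], roots, n, L, item, s, _, hs => by
    subst hs
    have hb : bStep L roots [] n = (roots.snoc n, []) := rfl
    refine ⟨?_, by rw [List.map_nil, hb]; simp [aInner], ?_⟩
    · rw [List.map_nil, hb]
      simp only [aInner, snoc_renderItems, pvPrefs, splitLiLi,
        String.append_assoc, String.append_empty, String.empty_append]
    · rw [hb]
      simp
  | (l2, a2, ch2) :: rest2, roots, n, L, item, s, hch, hs => by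
    simp only [List.map_cons] at hch ⊢
    obtain ⟨hhd, htl⟩ := List.isChain_cons.mp hch
    have hbs : bStep L roots ((l2, a2, ch2) :: rest2) n
        = bPop L roots ((l2, a2, ch2.snoc n) :: rest2) := rfl
    by_cases h1 : L = l2
    · subst h1
      rw [bPop_eq_bStep L roots L a2 (ch2.snoc n) rest2 le_rfl] at hbs
      have ha : aInner L item s (L :: rest2.map (·.1))
          = (s ++ "</li>\n</ul>\n</li>\n<li>" ++ item, L :: rest2.map (·.1)) := by
        simp [aInner]
      cases rest2 with
      | nil =>
        have hb : bStep L roots ((L, a2, ch2) :: []) n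
            = (roots.snoc (.node a2 (ch2.snoc n)), []) := hbs
        subst hs
        refine ⟨?_, by rw [ha, hb]; try simp, ?_⟩
        · rw [ha, hb]
          simp only [snoc_renderItems, node_snoc, pvPrefs, pvPref, splitCloseLiLi, splitNlUl,
            String.append_assoc, String.append_empty, String.empty_append]
        · rw [hb]
          simp
      | cons f3 r3 =>
        obtain ⟨l3, a3, ch3⟩ := f3
        have hl3 : l3 < L := hhd l3 (by simp)
        have hb : bStep L roots ((L, a2, ch2) :: (l3, a3, ch3) :: r3) n
            = (roots, (l3, a3, ch3.snoc (.node a2 (ch2.snoc n))) :: r3) := by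
          rw [hbs]
          exact bPop_stop L roots l3 a3 _ r3 (by omega)
        subst hs
        refine ⟨?_, by rw [ha, hb]; try simp, ?_⟩
        · rw [ha, hb]
          simp only [snoc_renderItems, node_snoc, pvPrefs, pvPref, splitCloseLiLi, splitNlUl,
            String.append_assoc, String.append_empty, String.empty_append]
        · rw [hb]
          exact List.isChain_cons.mpr ⟨by simpa using hl3, by simpa using htl⟩
    · by_cases h2 : l2 < L
      · have ha : aInner L item s (l2 :: rest2.map (·.1))
            = (s ++ "</li>\n<li>" ++ item, L :: l2 :: rest2.map (·.1)) := by
          simp [aInner, h1, h2]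
        have hb : bStep L roots ((l2, a2, ch2) :: rest2) n
            = (roots, (l2, a2, ch2.snoc n) :: rest2) := by
          rw [hbs]
          exact bPop_stop L roots l2 a2 (ch2.snoc n) rest2 (by omega)
        subst hs
        refine ⟨?_, by rw [ha, hb]; try simp, ?_⟩
        · rw [ha, hb]
          simp only [snoc_renderItems, pvPrefs, pvPref, splitLiLi, splitNlUl,
            String.append_assoc, String.append_empty, String.empty_append]
        · rw [hb]
          exact List.isChain_cons.mpr ⟨by simpa using h2, by simpa using hch⟩
      · have h3 : L < l2 := by omega
        rw [bPop_eq_bStep L roots l2 a2 (ch2.snoc n) rest2 (by omega)] at hbs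
        have hs' : s ++ "</li>\n</ul>\n"
            = "<ul>\n" ++ (renderItems roots ++ (pvPrefs rest2 ++ renderNode (.node a2 (ch2.snoc n)))) := by
          subst hs
          simp only [node_snoc, pvPrefs, splitClose, String.append_assoc]
        have IH := inner_lemma rest2 roots (.node a2 (ch2.snoc n)) L item
          (s ++ "</li>\n</ul>\n") htl hs'
        have ha : aInner L item s (l2 :: rest2.map (·.1))
            = aInner L item (s ++ "</li>\n</ul>\n") (rest2.map (·.1)) := by
          have h4 : ¬ L > l2 := by omega
          simp [aInner, h1, h4]
        rw [ha, hbs]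
        exact IH

theorem main_lemma : ∀ (tl : List (Int × String × String)) (roots : PvForest) (l : Int) (a : String)
    (rest : List (Int × String × PvForest)) (s : String),
    List.IsChain (fun x y : Int => y < x) (l :: rest.map (·.1)) →
    s = "<ul>\n" ++ (renderItems roots ++ (pvPrefs rest ++ ("<li>" ++ a))) →
    aClose (tl.foldl aStep (s, l :: rest.map (·.1))).2 (tl.foldl aStep (s, l :: rest.map (·.1))).1 =
      "<ul>\n" ++ renderItems (bCloseAll (bBuild roots ((l, a, PvForest.nil) :: rest) tl).1
        (bBuild roots ((l, a, PvForest.nil) :: rest) tl).2) ++ "</ul>\n"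
  | [], roots, l, a, rest, s, _, hs => by
    subst hs
    rw [List.foldl_nil]
    rw [show bBuild roots ((l, a, PvForest.nil) :: rest) [] = (roots, (l, a, PvForest.nil) :: rest) from rfl]
    rw [aClose_eq]
    have hf := final_lemma rest roots l a PvForest.nil
    simp only [List.length_cons, List.length_map, Nat.add_sub_cancel, String.append_assoc]
    rw [hf]
    simp only [renderNode, pvPrefs, splitClose,
      String.append_assoc, String.append_empty, String.empty_append]
  | (L, k, txt) :: tl', roots, l, a, rest, s, hch, hs => by
    rw [List.foldl_cons]
    obtain ⟨hhd, htl⟩ := List.isChain_cons.mp hch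
    rw [show bBuild roots ((l, a, PvForest.nil) :: rest) ((L, k, txt) :: tl')
        = bBuild (bPop L roots ((l, a, PvForest.nil) :: rest)).1
            ((L, "<a href=\"#" ++ k ++ "\">" ++ txt ++ "</a>", PvForest.nil)
              :: (bPop L roots ((l, a, PvForest.nil) :: rest)).2) tl' from rfl]
    by_cases h1 : L = l
    · subst h1
      have ha : aStep (s, L :: rest.map (·.1)) (L, k, txt)
          = (s ++ "</li>\n<li>" ++ ("<a href=\"#" ++ k ++ "\">" ++ txt ++ "</a>"), L :: rest.map (·.1)) := by
        simp [aStep]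
      rw [ha, bPop_eq_bStep L roots L a PvForest.nil rest le_rfl]
      cases rest with
      | nil =>
        have hb : bStep L roots [] (.node a .nil) = (roots.snoc (.node a .nil), []) := rfl
        rw [hb]
        refine main_lemma tl' _ L _ _ _ (by simp) ?_
        subst hs
        simp only [snoc_renderItems, renderNode, pvPrefs, splitLiLi,
          String.append_assoc, String.append_empty, String.empty_append]
      | cons f2 r2 =>
        obtain ⟨l2, a2, ch2⟩ := f2
        have hl2 : l2 < L := hhd l2 (by simp)
        have hb : bStep L roots ((l2, a2, ch2) :: r2) (.node a .nil)
            = (roots, (l2, a2, ch2.snoc (.node a .nil)) :: r2) := by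
          rw [show bStep L roots ((l2, a2, ch2) :: r2) (.node a .nil)
              = bPop L roots ((l2, a2, ch2.snoc (.node a .nil)) :: r2) from rfl]
          exact bPop_stop L roots l2 a2 _ r2 (by omega)
        rw [hb]
        have hc : List.IsChain (fun x y : Int => y < x)
            (L :: List.map (·.1) ((l2, a2, ch2.snoc (.node a .nil)) :: r2)) := by
          simp only [List.map_cons]
          exact List.isChain_cons.mpr ⟨by intro y hy; simp at hy; omega, by simpa using htl⟩
        have hs2 : s ++ "</li>\n<li>" ++ ("<a href=\"#" ++ k ++ "\">" ++ txt ++ "</a>")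
            = "<ul>\n" ++ (renderItems roots ++ (pvPrefs ((l2, a2, ch2.snoc (.node a .nil)) :: r2)
                ++ ("<li>" ++ ("<a href=\"#" ++ k ++ "\">" ++ txt ++ "</a>")))) := by
          subst hs
          simp only [snoc_renderItems, renderNode, pvPrefs, pvPref, splitLiLi,
            String.append_assoc, String.append_empty, String.empty_append]
        have H := main_lemma tl' roots L ("<a href=\"#" ++ k ++ "\">" ++ txt ++ "</a>")
          ((l2, a2, ch2.snoc (.node a .nil)) :: r2) _ hc hs2
        simpa only [List.map_cons] using H
    · by_cases h2 : l < L
      · have ha : aStep (s, l :: rest.map (·.1)) (L, k, txt)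
            = (s ++ "\n<ul>\n<li>" ++ ("<a href=\"#" ++ k ++ "\">" ++ txt ++ "</a>"), L :: l :: rest.map (·.1)) := by
          simp [aStep, h1, h2]
        rw [ha, bPop_stop L roots l a PvForest.nil rest (by omega)]
        have hc : List.IsChain (fun x y : Int => y < x)
            (L :: List.map (·.1) ((l, a, PvForest.nil) :: rest)) := by
          simp only [List.map_cons]
          exact List.isChain_cons.mpr ⟨by intro y hy; simp at hy; omega, by simpa using hch⟩
        have hs2 : s ++ "\n<ul>\n<li>" ++ ("<a href=\"#" ++ k ++ "\">" ++ txt ++ "</a>")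
            = "<ul>\n" ++ (renderItems roots ++ (pvPrefs ((l, a, PvForest.nil) :: rest)
                ++ ("<li>" ++ ("<a href=\"#" ++ k ++ "\">" ++ txt ++ "</a>")))) := by
          subst hs
          simp only [renderItems, pvPrefs, pvPref, splitNlUlLi, splitNlUl,
            String.append_assoc, String.append_empty, String.empty_append]
        have H := main_lemma tl' roots L ("<a href=\"#" ++ k ++ "\">" ++ txt ++ "</a>")
          ((l, a, PvForest.nil) :: rest) _ hc hs2
        simpa only [List.map_cons] using H
      · have h3 : L < l := by omega
        have ha : aStep (s, l :: rest.map (·.1)) (L, k, txt)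
            = aInner L ("<a href=\"#" ++ k ++ "\">" ++ txt ++ "</a>") s (rest.map (·.1)) := by
          have h4 : ¬ L > l := by omega
          simp [aStep, h1, h4]
        have hs' : s = "<ul>\n" ++ (renderItems roots ++ (pvPrefs rest ++ renderNode (.node a .nil))) := by
          subst hs
          simp only [renderNode, String.append_empty]
        obtain ⟨e1, e2, e3⟩ := inner_lemma rest roots (.node a .nil) L
          ("<a href=\"#" ++ k ++ "\">" ++ txt ++ "</a>") s htl hs'
        rw [ha, bPop_eq_bStep L roots l a PvForest.nil rest (by omega)]
        rw [show aInner L ("<a href=\"#" ++ k ++ "\">" ++ txt ++ "</a>") s (rest.map (·.1))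
            = ((aInner L ("<a href=\"#" ++ k ++ "\">" ++ txt ++ "</a>") s (rest.map (·.1))).1,
               (aInner L ("<a href=\"#" ++ k ++ "\">" ++ txt ++ "</a>") s (rest.map (·.1))).2) from rfl,
          e2]
        exact main_lemma tl' _ L _ _ _ e3 e1

-- ===== VERDICT (by name: the statement is the Claim_ definition above) =====
theorem render_toc_ul_spec : Claim_equal_render_toc_ul := by
  intro toc _
  unfold Spec_render_toc_ul
  cases toc with
  | nil => rfl
  | cons hd tl =>
    obtain ⟨L, k, txt⟩ := hd
    have H := main_lemma tl PvForest.nil L ("<a href=\"#" ++ k ++ "\">" ++ txt ++ "</a>") []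
      ("<ul>\n" ++ "<li>" ++ ("<a href=\"#" ++ k ++ "\">" ++ txt ++ "</a>"))
      (by simp)
      (by simp only [renderItems, pvPrefs, String.append_assoc, String.append_empty,
            String.empty_append])
    simpa only [render_toc_ul, render_toc_ul_alt, List.foldl_cons, aStep, bBuild, bPop,
      List.map_nil, String.append_assoc] using H
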